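-- pv_equiv track=rewrite | github.com/addy9908/iMOSS | Data_Analysis/ZY_ML_autoThreshold_V4.py | _expand_int_range
-- ===== SOURCE A (Python) =====
-- from typing import Dict, Any, List, Optional #Tuple,
--
-- def _expand_int_range(center_vals: List[int], widen: int, lo: int, hi: int):
--     """Given some center values, expand around them up to 'widen' and clamp."""
--     expanded = set(center_vals)
--     for v in center_vals:
--         for d in range(1, widen + 1):
--             expanded.add(v + d)
--             expanded.add(v - d)
--     expanded = [v for v in expanded if lo <= v <= hi]
--     return sorted(set(expanded))
-- ===== SOURCE B (Python) =====
-- def _expand_int_range(center_vals, widen, lo, hi):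
--     """Sort centers, sweep once merging the +/-widen intervals, emit clamped ints."""
--     w = widen if widen > 0 else 0
--     out = []
--     start = lo
--     for v in sorted(center_vals):
--         a = v - w if v - w > start else start
--         b = v + w if v + w < hi else hi
--         out.extend(range(a, b + 1))
--         if b + 1 > start:
--             start = b + 1
--     return out
-- ===== Notes on version B (the rewrite author's own statement) =====
-- stated objective: faster
-- what changed: Instead of materialising all n*(2*widen+1) candidate values in a set, filtering and sorting them, B sorts the centers once and sweeps left-to-right merging the +/-widen intervals, emitting each output integer exactly once already in increasing order.
import Mathlib
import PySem

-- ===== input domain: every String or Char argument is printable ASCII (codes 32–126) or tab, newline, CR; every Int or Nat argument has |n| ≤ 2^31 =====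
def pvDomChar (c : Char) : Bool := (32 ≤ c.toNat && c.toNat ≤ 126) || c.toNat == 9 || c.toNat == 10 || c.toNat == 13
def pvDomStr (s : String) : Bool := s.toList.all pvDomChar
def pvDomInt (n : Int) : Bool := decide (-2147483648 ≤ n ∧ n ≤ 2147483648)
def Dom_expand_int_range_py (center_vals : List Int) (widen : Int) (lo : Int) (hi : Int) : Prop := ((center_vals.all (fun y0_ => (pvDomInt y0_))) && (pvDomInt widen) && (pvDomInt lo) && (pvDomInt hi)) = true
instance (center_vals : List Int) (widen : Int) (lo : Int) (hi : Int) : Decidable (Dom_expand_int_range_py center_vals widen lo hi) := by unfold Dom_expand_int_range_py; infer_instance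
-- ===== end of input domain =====

-- B merges the sorted ±widen intervals in one sweep instead of materialising and sorting every candidate.

-- ===== PORT A =====
-- Python's hash 'set' is modelled by Std.TreeSet Int (exact here: the set is only used for
-- membership/dedup, and its iteration feeds a filter whose result is passed through sorted(set(...)),
-- so the result never depends on the set's iteration order); 'sorted' is ported as List.mergeSort.
def expand_int_range_py (center_vals : List Int) (widen : Int) (lo : Int) (hi : Int) : List Int :=
  let expanded : Std.TreeSet Int compare :=
    center_vals.foldl (fun s v => s.insert v) ∅
  let expanded : Std.TreeSet Int compare :=
    center_vals.foldl (fun s v =>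
      (PySem.List.pyRange 1 (widen + 1) 1).foldl (fun s d =>
        (s.insert (v + d)).insert (v - d)) s) expanded
  let expanded2 : List Int := expanded.toList.filter (fun v => decide (lo ≤ v) && decide (v ≤ hi))
  (expanded2.foldl (fun s v => s.insert v) (∅ : Std.TreeSet Int compare)).toList.mergeSort
    (fun a b => decide (a ≤ b))

-- ===== PORT B =====
-- the sweep: for each center (sorted ascending) emit range(max(v-w,start), min(v+w,hi)+1), bump start
def expandSweep (w hi : Int) : List Int → Int → List Int → List Int
  | [], _, out => out
  | v :: vs, start, out =>
      let a := if v - w > start then v - w else start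
      let b := if v + w < hi then v + w else hi
      expandSweep w hi vs (if b + 1 > start then b + 1 else start)
        (out ++ PySem.List.pyRange a (b + 1) 1)

def expand_int_range_py_alt (center_vals : List Int) (widen : Int) (lo : Int) (hi : Int) : List Int :=
  let w := if widen > 0 then widen else 0
  expandSweep w hi (PySem.List.sorted center_vals (fun x => x) false) lo []

-- ===== PRECONDITION & SPEC =====
def Spec_expand_int_range_py (center_vals : List Int) (widen : Int) (lo : Int) (hi : Int) (out : List Int) : Prop := out = expand_int_range_py_alt center_vals widen lo hi
instance (center_vals : List Int) (widen : Int) (lo : Int) (hi : Int) (out : List Int) : Decidable (Spec_expand_int_range_py center_vals widen lo hi out) := by unfold Spec_expand_int_range_py; infer_instance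

-- ===== CLAIM (what is proved, stated in full; the proofs are below) =====
def Claim_equal_expand_int_range_py : Prop := ∀ (center_vals : List Int) (widen : Int) (lo : Int) (hi : Int), Dom_expand_int_range_py center_vals widen lo hi → Spec_expand_int_range_py center_vals widen lo hi (expand_int_range_py center_vals widen lo hi)

-- ===== LEMMAS AND PROOFS =====

theorem mem_ts_insert (s : Std.TreeSet Int compare) (v x : Int) :
    x ∈ s.insert v ↔ x = v ∨ x ∈ s := by
  rw [Std.TreeSet.mem_insert, compare_eq_iff_eq]
  exact or_congr_left eq_comm

theorem mem_foldl_insert (l : List Int) (s : Std.TreeSet Int compare) (x : Int) :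
    x ∈ l.foldl (fun s v => s.insert v) s ↔ x ∈ s ∨ x ∈ l := by
  induction l generalizing s with
  | nil => simp
  | cons v vs ih =>
    simp only [List.foldl_cons, ih, mem_ts_insert, List.mem_cons]
    tauto

theorem mem_inner (v : Int) (ds : List Int) (s : Std.TreeSet Int compare) (x : Int) :
    (x ∈ ds.foldl (fun s d => (s.insert (v + d)).insert (v - d)) s) ↔
    x ∈ s ∨ ∃ d ∈ ds, x = v + d ∨ x = v - d := by
  induction ds generalizing s with
  | nil => simp
  | cons d ds ih =>
    simp only [List.foldl_cons, ih, mem_ts_insert, List.mem_cons]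
    constructor
    · rintro ((h | h | h) | ⟨e, he, h⟩)
      · exact Or.inr ⟨d, Or.inl rfl, Or.inr h⟩
      · exact Or.inr ⟨d, Or.inl rfl, Or.inl h⟩
      · exact Or.inl h
      · exact Or.inr ⟨e, Or.inr he, h⟩
    · rintro (h | ⟨e, (rfl | he), h⟩)
      · exact Or.inl (Or.inr (Or.inr h))
      · rcases h with h | h
        · exact Or.inl (Or.inr (Or.inl h))
        · exact Or.inl (Or.inl h)
      · exact Or.inr ⟨e, he, h⟩

theorem mem_outer (widen : Int) (center_vals : List Int) (s : Std.TreeSet Int compare) (x : Int) :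
    (x ∈ center_vals.foldl (fun s v =>
      (PySem.List.pyRange 1 (widen + 1) 1).foldl (fun s d =>
        (s.insert (v + d)).insert (v - d)) s) s) ↔
    x ∈ s ∨ ∃ v ∈ center_vals, ∃ d ∈ PySem.List.pyRange 1 (widen + 1) 1, x = v + d ∨ x = v - d := by
  induction center_vals generalizing s with
  | nil => simp
  | cons v vs ih =>
    simp only [List.foldl_cons, ih, mem_inner, List.mem_cons]
    constructor
    · rintro ((h | ⟨d, hd, h⟩) | ⟨u, hu, d, hd, h⟩)
      · exact Or.inl h
      · exact Or.inr ⟨v, Or.inl rfl, d, hd, h⟩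
      · exact Or.inr ⟨u, Or.inr hu, d, hd, h⟩
    · rintro (h | ⟨u, (rfl | hu), d, hd, h⟩)
      · exact Or.inl (Or.inl h)
      · exact Or.inl (Or.inr ⟨d, hd, h⟩)
      · exact Or.inr ⟨u, hu, d, hd, h⟩

-- membership in A's fully expanded set, as a distance condition
theorem memA (center_vals : List Int) (widen : Int) (x : Int) :
    (x ∈ center_vals.foldl (fun s v =>
      (PySem.List.pyRange 1 (widen + 1) 1).foldl (fun s d =>
        (s.insert (v + d)).insert (v - d)) s)
      (center_vals.foldl (fun s v => s.insert v) (∅ : Std.TreeSet Int compare))) ↔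
    ∃ v ∈ center_vals, v - (if widen > 0 then widen else 0) ≤ x ∧ x ≤ v + (if widen > 0 then widen else 0) := by
  rw [mem_outer, mem_foldl_insert]
  simp only [Std.TreeSet.not_mem_emptyc, false_or]
  constructor
  · rintro (h | ⟨v, hv, d, hd, hx⟩)
    · exact ⟨x, h, by split_ifs <;> omega⟩
    · rw [PySem.List.mem_pyRange_one] at hd
      exact ⟨v, hv, by split_ifs <;> omega⟩
  · rintro ⟨v, hv, h1, h2⟩
    by_cases hxv : x = v
    · exact Or.inl (by simpa [hxv] using hv)
    · refine Or.inr ⟨v, hv, if x > v then x - v else v - x, ?_, ?_⟩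
      · rw [PySem.List.mem_pyRange_one]; split_ifs at * <;> omega
      · split_ifs <;> omega

theorem ts_toList_lt (t : Std.TreeSet Int compare) : t.toList.Pairwise (· < ·) :=
  Std.TreeSet.ordered_toList.imp (fun h => compare_lt_iff_lt.mp h)

theorem sweep_spec (w hi : Int) :
    ∀ (l : List Int) (start : Int) (out : List Int), l.Pairwise (· ≤ ·) →
    ∃ r, expandSweep w hi l start out = out ++ r ∧ r.Pairwise (· < ·) ∧
      (∀ x, x ∈ r ↔ start ≤ x ∧ x ≤ hi ∧ ∃ v ∈ l, v - w ≤ x ∧ x ≤ v + w) := by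
  intro l
  induction l with
  | nil =>
    intro start out _
    exact ⟨[], by simp [expandSweep], List.Pairwise.nil, by simp⟩
  | cons v vs ih =>
    intro start out hp
    rw [List.pairwise_cons] at hp
    obtain ⟨hle, hvs⟩ := hp
    set a := if v - w > start then v - w else start with ha
    set b := if v + w < hi then v + w else hi with hb
    set s' := if b + 1 > start then b + 1 else start with hs
    have haf : v - w ≤ a ∧ start ≤ a ∧ (a = v - w ∨ a = start) := by
      rw [ha]; split_ifs <;> omega
    have hbf : b ≤ v + w ∧ b ≤ hi ∧ (b = v + w ∨ b = hi) := by
      rw [hb]; split_ifs <;> omega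
    have hsf : start ≤ s' ∧ b + 1 ≤ s' ∧ (s' = b + 1 ∨ s' = start) := by
      rw [hs]; split_ifs <;> omega
    obtain ⟨r', heq, hpr', hmem'⟩ := ih s' (out ++ PySem.List.pyRange a (b + 1) 1) hvs
    have hunf : expandSweep w hi (v :: vs) start out
        = expandSweep w hi vs s' (out ++ PySem.List.pyRange a (b + 1) 1) := rfl
    refine ⟨PySem.List.pyRange a (b + 1) 1 ++ r', ?_, ?_, ?_⟩
    · rw [hunf, heq, List.append_assoc]
    · rw [List.pairwise_append]
      refine ⟨PySem.List.pairwise_lt_pyRange_one a (b + 1), hpr', ?_⟩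
      intro x hx y hy
      rw [PySem.List.mem_pyRange_one] at hx
      have hy' := (hmem' y).mp hy
      omega
    · intro x
      rw [List.mem_append, PySem.List.mem_pyRange_one, hmem']
      constructor
      · rintro (h | ⟨h1, h2, u, hu, h3, h4⟩)
        · exact ⟨by omega, by omega, v, List.mem_cons_self, by omega, by omega⟩
        · exact ⟨by omega, h2, u, List.mem_cons_of_mem _ hu, h3, h4⟩
      · rintro ⟨h1, h2, u, hu, h3, h4⟩
        rcases List.mem_cons.mp hu with rfl | hu
        · left; omega
        · by_cases hx : s' ≤ x
          · exact Or.inr ⟨hx, h2, u, hu, h3, h4⟩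
          · have hvu : v ≤ u := hle u hu
            left; omega

-- ===== VERDICT (by name: the statement is the Claim_ definition above) =====
theorem expand_int_range_py_spec : Claim_equal_expand_int_range_py := by
  unfold Claim_equal_expand_int_range_py Spec_expand_int_range_py
  intro center_vals widen lo hi _
  unfold expand_int_range_py expand_int_range_py_alt
  dsimp only
  set w := if widen > 0 then widen else 0 with hwdef
  have hsrt : (PySem.List.sorted center_vals (fun x => x) false).Pairwise (· ≤ ·) :=
    PySem.List.sorted_pairwise center_vals (fun x => x)
  obtain ⟨r, heq, hpr, hmem⟩ :=
    sweep_spec w hi (PySem.List.sorted center_vals (fun x => x) false) lo [] hsrt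
  rw [heq, List.nil_append]
  set t2 := (((center_vals.foldl (fun s v =>
      (PySem.List.pyRange 1 (widen + 1) 1).foldl (fun s d =>
        (s.insert (v + d)).insert (v - d)) s)
      (center_vals.foldl (fun s v => s.insert v)
        (∅ : Std.TreeSet Int compare))).toList.filter
      (fun v => decide (lo ≤ v) && decide (v ≤ hi))).foldl (fun s v => s.insert v)
      (∅ : Std.TreeSet Int compare)) with ht2
  rw [List.mergeSort_eq_self (r := (· ≤ ·)) ((ts_toList_lt t2).imp fun h => le_of_lt h)]
  have hmemt2 : ∀ x, x ∈ t2.toList ↔ x ∈ r := by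
    intro x
    rw [Std.TreeSet.mem_toList, ht2, mem_foldl_insert]
    simp only [Std.TreeSet.not_mem_emptyc, false_or, List.mem_filter,
      Std.TreeSet.mem_toList, Bool.and_eq_true, decide_eq_true_eq]
    rw [memA, hmem x, ← hwdef]
    simp only [PySem.List.mem_sorted]
    constructor
    · rintro ⟨⟨u, hu, h3, h4⟩, h1, h2⟩
      exact ⟨h1, h2, u, hu, h3, h4⟩
    · rintro ⟨h1, h2, u, hu, h3, h4⟩
      exact ⟨⟨u, hu, h3, h4⟩, h1, h2⟩
  have hperm : t2.toList.Perm r := by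
    rw [List.perm_ext_iff_of_nodup ((ts_toList_lt t2).imp fun h => ne_of_lt h)
      (hpr.imp fun h => ne_of_lt h)]
    exact hmemt2
  exact List.Perm.eq_of_pairwise (fun a b _ _ h1 h2 => le_antisymm h1 h2)
    ((ts_toList_lt t2).imp fun h => le_of_lt h) (hpr.imp fun h => le_of_lt h) hperm
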